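-- pv_equiv track=rewrite | github.com/MichaelSquires/AdventOfCode | 2015/d1.py | part2
-- ===== SOURCE A (Python) =====
-- def part2(data):
--     floor = 0
--     position = 0
--
--     for position in range(len(data)):
--         if data[position] == '(':
--             floor += 1
--         else:
--             floor -= 1
--
--         if floor == -1:
--             return position + 1
--
--         position += 1
--
--     raise Exception('Does not enter basement')
-- ===== SOURCE B (Python) =====
-- def part2(data):
--     # Pass 1: prefix table of '(' counts.
--     prefix = []
--     opens = 0
--     for c in data:
--         if c == '(':
--             opens += 1
--         prefix.append(opens)
--     # Pass 2: floor after k chars is 2*opens_k - k, so floor == -1  iff  2*opens_k == k - 1.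
--     for k, o in enumerate(prefix, start=1):
--         if 2 * o == k - 1:
--             return k
--     raise Exception('Does not enter basement')
-- ===== Notes on version B (the rewrite author's own statement) =====
-- stated objective: alternative
-- what changed: B drops the running floor accumulator: a first pass builds a prefix table of '(' counts, and a second pass returns the first k with 2*opens_k == k-1, an arithmetic characterisation of floor == -1.
import Mathlib
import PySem

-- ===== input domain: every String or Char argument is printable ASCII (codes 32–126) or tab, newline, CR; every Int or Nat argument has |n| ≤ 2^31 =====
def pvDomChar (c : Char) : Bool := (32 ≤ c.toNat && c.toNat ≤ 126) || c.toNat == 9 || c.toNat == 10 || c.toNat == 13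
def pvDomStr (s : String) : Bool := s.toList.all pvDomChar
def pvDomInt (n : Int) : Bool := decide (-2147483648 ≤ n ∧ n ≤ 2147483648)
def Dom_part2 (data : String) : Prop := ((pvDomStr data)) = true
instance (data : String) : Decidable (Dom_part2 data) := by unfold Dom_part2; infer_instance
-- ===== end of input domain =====

-- B replaces A's running-floor loop by a prefix table of '(' counts plus an arithmetic
-- scan (first k with 2*opens_k = k-1); same value wherever A returns (both raise otherwise).

-- ===== PORT A =====
-- the 'for position in range(len(data))' loop; returning none = falling through to the raise
def part2Go (l : List Char) (floor : Int) : List Int → Option Int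
  | [] => none
  | p :: rest =>
    match PySem.List.pyGet? l p with
    | none => none   -- unreachable: p is a valid index produced by range(len(data))
    | some c =>
      let floor' := if c = '(' then floor + 1 else floor - 1
      if floor' = -1 then some (p + 1) else part2Go l floor' rest

def part2 (data : String) : Int :=
  (part2Go data.toList 0 (PySem.List.pyRange 0 (data.toList.length : Int) 1)).getD 0

-- ===== PORT B =====
-- pass 1: prefix table of '(' counts
def prefixOpens : List Char → Int → List Int
  | [], _ => []
  | c :: rest, opens =>
    let opens' := if c = '(' then opens + 1 else opens
    opens' :: prefixOpens rest opens'

-- pass 2: first k (1-based) with 2*opens_k = k-1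
def scanOpens : List Int → Int → Option Int
  | [], _ => none
  | o :: rest, k => if 2 * o = k - 1 then some k else scanOpens rest (k + 1)

def part2_alt (data : String) : Int :=
  (scanOpens (prefixOpens data.toList 0) 1).getD 0

-- ===== PRECONDITION & SPEC =====
-- Pre_ excludes exactly the inputs on which Python A raises (the running floor never
-- reaches -1); B raises the same exception with the same message there.
def Pre_part2 (data : String) : Prop :=
  ∃ k ∈ List.range data.toList.length, 2 * ((data.toList.take (k + 1)).count '(') = k
instance (data : String) : Decidable (Pre_part2 data) := by unfold Pre_part2; infer_instance

def pvWitness_part2 : String := ")"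

def Spec_part2 (data : String) (out : Int) : Prop := out = part2_alt data
instance (data : String) (out : Int) : Decidable (Spec_part2 data out) := by unfold Spec_part2; infer_instance

-- ===== CLAIM (what is proved, stated in full; the proofs are below) =====
def Claim_equal_part2 : Prop := ∀ (data : String), Dom_part2 data → Pre_part2 data → Spec_part2 data (part2 data)

-- ===== LEMMAS AND PROOFS =====

-- reference: direct structural recursion over the remaining characters
def refGo : List Char → Int → Int → Option Int
  | [], _, _ => none
  | c :: rest, floor, p =>
    let floor' := if c = '(' then floor + 1 else floor - 1
    if floor' = -1 then some (p + 1) else refGo rest floor' (p + 1)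

lemma part2Go_eq_refGo (l : List Char) :
    ∀ (d : List Char) (p : Nat), d = l.drop p → ∀ floor,
      part2Go l floor (PySem.List.pyRange (p : Int) (l.length : Int) 1) = refGo d floor (p : Int) := by
  intro d
  induction d with
  | nil =>
    intro p hd floor
    have hlen : l.length ≤ p := by
      by_contra h
      have := List.drop_eq_getElem_cons (by omega : p < l.length) (l := l)
      rw [this] at hd; exact List.cons_ne_nil _ _ hd.symm
    rw [PySem.List.pyRange_one_eq_nil (by exact_mod_cast hlen)]
    rfl
  | cons c rest ih =>
    intro p hd floor
    have hp : p < l.length := by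
      by_contra h
      rw [List.drop_eq_nil_of_le (by omega)] at hd; exact List.cons_ne_nil _ _ hd
    rw [PySem.List.pyRange_one_cons (by exact_mod_cast hp)]
    have hget : PySem.List.pyGet? l (p : Int) = some c := by
      rw [PySem.List.pyGet?_natCast]
      have h0 : (l.drop p)[0]? = some c := by rw [← hd]; rfl
      simpa using h0
    have hrest : rest = l.drop (p + 1) := by
      have h1 := congrArg (List.drop 1) hd
      simpa [Nat.add_comm] using h1
    simp only [part2Go, hget, refGo]
    by_cases hf : (if c = '(' then floor + 1 else floor - 1) = -1
    · rw [if_pos hf, if_pos hf]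
    · rw [if_neg hf, if_neg hf]
      have hIH := ih (p + 1) hrest (if c = '(' then floor + 1 else floor - 1)
      push_cast at hIH
      exact hIH

lemma scanOpens_eq_refGo :
    ∀ (d : List Char) (opens k : Int),
      scanOpens (prefixOpens d opens) (k + 1) = refGo d (2 * opens - k) k := by
  intro d
  induction d with
  | nil => intro opens k; rfl
  | cons c rest ih =>
    intro opens k
    simp only [prefixOpens, scanOpens, refGo]
    have harith : (2 * (if c = '(' then opens + 1 else opens) = k + 1 - 1) ↔
        ((if c = '(' then 2 * opens - k + 1 else 2 * opens - k - 1) = -1) := by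
      split_ifs <;> omega
    by_cases h : 2 * (if c = '(' then opens + 1 else opens) = k + 1 - 1
    · rw [if_pos h, if_pos (harith.mp h)]
    · rw [if_neg h, if_neg (fun hc => h (harith.mpr hc))]
      have := ih (if c = '(' then opens + 1 else opens) (k + 1)
      rw [this]
      congr 1
      split_ifs <;> omega

lemma part2_eq_alt (data : String) : part2 data = part2_alt data := by
  unfold part2 part2_alt
  have hA := part2Go_eq_refGo data.toList data.toList 0 rfl 0
  have hB := scanOpens_eq_refGo data.toList 0 0
  simp only [Nat.cast_zero, zero_add] at hA hB
  rw [hA, hB]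
  norm_num

-- ===== VERDICT (by name: the statement is the Claim_ definition above) =====
theorem part2_spec : Claim_equal_part2 := by
  intro data _ _
  exact part2_eq_alt data
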